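-- pv_equiv track=rewrite | github.com/pbelskiy/contest | leetcode.com/2231_largest_number_after_digit_swaps_by_parity/solution.py | largestInteger
-- ===== SOURCE A (Python) =====
-- def largestInteger(num: int) -> int:
--     odd, even = [], []
--
--     for n in str(num):
--         if int(n) % 2 == 0:
--             even.append(n)
--         else:
--             odd.append(n)
--
--     odd.sort()
--     even.sort()
--
--     s = ''
--     for n in str(num):
--         if int(n) % 2 == 0:
--             s += even.pop()
--         else:
--             s += odd.pop()
--
--     return int(s)
-- ===== SOURCE B (Python) =====
-- def largestInteger(num: int) -> int:
--     cnt = [0] * 10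
--     for ch in str(num):
--         cnt[int(ch)] += 1
--
--     res = ''
--     for ch in str(num):
--         start = 9 if int(ch) % 2 else 8
--         for k in range(start, -1, -2):
--             if cnt[k]:
--                 cnt[k] -= 1
--                 res += str(k)
--                 break
--     return int(res)
-- ===== Notes on version B (the rewrite author's own statement) =====
-- stated objective: alternative
-- what changed: B replaces A's two sorted digit lists with back pops by a length-10 frequency table built in one pass, emitting for each position the largest unused digit of its parity by scanning the table downward.
import Mathlib
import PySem

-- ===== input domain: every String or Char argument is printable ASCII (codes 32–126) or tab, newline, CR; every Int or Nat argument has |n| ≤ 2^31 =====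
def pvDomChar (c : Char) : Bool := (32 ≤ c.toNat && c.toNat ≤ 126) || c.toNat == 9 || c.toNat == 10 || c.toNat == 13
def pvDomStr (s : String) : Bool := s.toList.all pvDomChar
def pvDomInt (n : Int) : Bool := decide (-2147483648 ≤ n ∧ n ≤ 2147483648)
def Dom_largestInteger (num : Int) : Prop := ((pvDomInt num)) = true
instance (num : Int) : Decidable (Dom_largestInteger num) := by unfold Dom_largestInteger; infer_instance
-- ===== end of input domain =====

-- B replaces A's two sorted digit lists (popped from the back) by a length-10 digit-frequency
-- table scanned downward per position: an alternative algorithm of similar cost.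


-- ===== PORT A =====
-- int(c) for a single decimal-digit character; exact on '0'..'9' (the only characters
-- str(num) contains under Pre_, which restricts to 0 ≤ num).
def pvDigit (c : Char) : Int := (c.toNat : Int) - 48

-- loop body of A's first loop: append n to even or odd by parity of int(n)
def pvPartStep (p : List Char × List Char) (n : Char) : List Char × List Char :=
  if PySem.Int.mod (pvDigit n) 2 == 0 then (p.1, p.2 ++ [n]) else (p.1 ++ [n], p.2)

-- loop body of A's second loop: s += even.pop() / odd.pop()
def pvStepA (st : List Char × List Char × List Char) (n : Char) : List Char × List Char × List Char :=
  if PySem.Int.mod (pvDigit n) 2 == 0 then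
    match PySem.List.pop? st.2.2 (-1) with
    | some (c, rest) => (st.1 ++ [c], st.2.1, rest)
    | none => st          -- even.pop() on empty raises IndexError; unreachable here
  else
    match PySem.List.pop? st.2.1 (-1) with
    | some (c, rest) => (st.1 ++ [c], rest, st.2.2)
    | none => st          -- odd.pop() on empty raises IndexError; unreachable here

def largestInteger (num : Int) : Int :=
  let ds := PySem.Int.toChars num
  let oe := ds.foldl pvPartStep ([], [])
  let odd := PySem.List.sorted oe.1 (fun x => x)
  let even := PySem.List.sorted oe.2 (fun x => x)
  let r := ds.foldl pvStepA ([], odd, even)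
  (PySem.Int.ofChars? r.1).getD 0   -- int(s); s is a nonempty digit string under Pre_

-- ===== PORT B =====
-- loop body of B's first loop: cnt[int(ch)] += 1
def pvCntStep (c : List Int) (ch : Char) : List Int :=
  PySem.List.pySetD c (pvDigit ch) ((PySem.List.pyGet? c (pvDigit ch)).getD 0 + 1)

-- 'for k in range(start, -1, -2): if cnt[k]: … break' — first k in ks with cnt[k] nonzero
def pvPick (cnt : List Int) : List Int → Option Int
  | [] => none
  | k :: t => if (PySem.List.pyGet? cnt k).getD 0 != 0 then some k else pvPick cnt t

-- loop body of B's second loop: pick the digit, decrement its count, res += str(k)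
def pvStepB (st : List Int × List Char) (ch : Char) : List Int × List Char :=
  let start : Int := if PySem.Int.mod (pvDigit ch) 2 != 0 then 9 else 8
  match pvPick st.1 (PySem.List.pyRange start (-1) (-2)) with
  | some k => (PySem.List.pySetD st.1 k ((PySem.List.pyGet? st.1 k).getD 0 - 1),
               st.2 ++ PySem.Int.toChars k)
  | none => st             -- inner for loop found no digit; unreachable here

def largestInteger_alt (num : Int) : Int :=
  let ds := PySem.Int.toChars num
  let cnt := ds.foldl pvCntStep (List.replicate 10 0)
  let r := ds.foldl pvStepB (cnt, [])
  (PySem.Int.ofChars? r.2).getD 0   -- int(res)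

-- ===== PRECONDITION & SPEC =====
-- Pre_ excludes negative num: there str(num) starts with '-' and int('-') raises ValueError in A
-- (and in B alike), so A returns on exactly the inputs admitted here.
def Pre_largestInteger (num : Int) : Prop := 0 ≤ num
instance (num : Int) : Decidable (Pre_largestInteger num) := by unfold Pre_largestInteger; infer_instance
def pvWitness_largestInteger : Int := 2736

def Spec_largestInteger (num : Int) (out : Int) : Prop := out = largestInteger_alt num
instance (num : Int) (out : Int) : Decidable (Spec_largestInteger num out) := by unfold Spec_largestInteger; infer_instance

-- ===== CLAIM (what is proved, stated in full; the proofs are below) =====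
def Claim_equal_largestInteger : Prop := ∀ (num : Int), Dom_largestInteger num → Pre_largestInteger num → Spec_largestInteger num (largestInteger num)

-- ===== LEMMAS AND PROOFS =====

-- c is a decimal digit character '0'..'9'
def pvIsDig (c : Char) : Prop := 48 ≤ c.toNat ∧ c.toNat ≤ 57

-- the digit character of value k (for 0 ≤ k ≤ 9)
def pvDch (k : Int) : Char := Char.ofNat (48 + k.toNat)

-- cnt[k] as an Int (total form of the in-range list read)
def pvCg (cnt : List Int) (k : Int) : Int := (PySem.List.pyGet? cnt k).getD 0

theorem pvDig_cases (c : Char) (h : pvIsDig c) :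
    c = '0' ∨ c = '1' ∨ c = '2' ∨ c = '3' ∨ c = '4' ∨ c = '5' ∨ c = '6' ∨ c = '7' ∨ c = '8' ∨ c = '9' := by
  obtain ⟨h1, h2⟩ := h
  interval_cases h3 : c.toNat <;> rw [← Char.ofNat_toNat c, h3] <;> decide

theorem pvChar_le (a b : Char) : a ≤ b ↔ a.toNat ≤ b.toNat := by
  rw [Char.le_def]; exact UInt32.le_iff_toNat_le ..

theorem pvDch_pvDigit (c : Char) (h : pvIsDig c) : pvDch (pvDigit c) = c := by
  rcases pvDig_cases c h with rfl|rfl|rfl|rfl|rfl|rfl|rfl|rfl|rfl|rfl <;> decide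

theorem pvDigit_pvDch (k : Int) (h1 : 0 ≤ k) (h2 : k < 10) : pvDigit (pvDch k) = k := by
  interval_cases k <;> decide

theorem pvDch_toNat (k : Int) (h1 : 0 ≤ k) (h2 : k < 10) : (pvDch k).toNat = 48 + k.toNat := by
  interval_cases k <;> decide

theorem pvDigit_bounds (c : Char) (h : pvIsDig c) : 0 ≤ pvDigit c ∧ pvDigit c < 10 := by
  obtain ⟨h1, h2⟩ := h
  unfold pvDigit
  omega

theorem pvToDigitsCore_dig (f : ℕ) : ∀ (n : ℕ) (ds : List Char),
    (∀ c ∈ ds, pvIsDig c) → ∀ c ∈ Nat.toDigitsCore 10 f n ds, pvIsDig c := by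
  induction f with
  | zero => intro n ds h; rw [Nat.toDigitsCore]; exact h
  | succ f ih =>
    intro n ds h
    have hd : pvIsDig (n % 10).digitChar := by
      unfold pvIsDig
      have h10 : n % 10 < 10 := Nat.mod_lt _ (by omega)
      interval_cases h5 : (n % 10) <;> decide
    rw [Nat.toDigitsCore]
    split
    · intro c hc
      rcases List.mem_cons.mp hc with rfl | hc
      · exact hd
      · exact h c hc
    · exact ih _ _ (by
        intro c hc
        rcases List.mem_cons.mp hc with rfl | hc
        · exact hd
        · exact h c hc)

theorem pvToChars_dig (num : Int) (h : 0 ≤ num) : ∀ c ∈ PySem.Int.toChars num, pvIsDig c := by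
  unfold PySem.Int.toChars
  rw [if_neg (by omega)]
  exact pvToDigitsCore_dig _ _ _ (by simp)

theorem pvToChars_small (k : Int) (h1 : 0 ≤ k) (h2 : k < 10) :
    PySem.Int.toChars k = [pvDch k] := by
  interval_cases k <;> decide

theorem pvCg_replicate (k : Int) (h1 : 0 ≤ k) (h2 : k < 10) : pvCg (List.replicate 10 0) k = 0 := by
  unfold pvCg
  rw [PySem.List.pyGet?_of_nonneg _ h1, List.getElem?_replicate]
  simp [show k.toNat < 10 by omega]

theorem pvSetD_eq_set (cnt : List Int) (k : Int) (v : Int) (h1 : 0 ≤ k) (h2 : k < cnt.length) :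
    PySem.List.pySetD cnt k v = cnt.set k.toNat v := by
  have hk : ((k.toNat : ℕ) : Int) = k := Int.toNat_of_nonneg h1
  rw [← hk]
  unfold PySem.List.pySetD
  rw [PySem.List.pySet?_natCast _ _ _ (by omega)]
  rfl

theorem pvSetD_length (cnt : List Int) (k : Int) (v : Int) (h1 : 0 ≤ k) (h2 : k < cnt.length) :
    (PySem.List.pySetD cnt k v).length = cnt.length := by
  rw [pvSetD_eq_set _ _ _ h1 h2]; simp

theorem pvCg_set (cnt : List Int) (k j v : Int) (h1 : 0 ≤ k) (h2 : k < cnt.length)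
    (hj1 : 0 ≤ j) (hj2 : j < cnt.length) :
    pvCg (PySem.List.pySetD cnt k v) j = if j = k then v else pvCg cnt j := by
  rw [pvSetD_eq_set _ _ _ h1 h2]
  unfold pvCg
  rw [PySem.List.pyGet?_of_nonneg (cnt.set k.toNat v) hj1,
      PySem.List.pyGet?_of_nonneg cnt hj1]
  rw [List.getElem?_set]
  by_cases h : j = k
  · subst h
    simp [show j.toNat < cnt.length by omega]
  · rw [if_neg (show ¬ k.toNat = j.toNat by omega), if_neg h]

theorem pvPick_none : ∀ (ks cnt : List Int), (∀ k ∈ ks, pvCg cnt k = 0) → pvPick cnt ks = none := by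
  intro ks
  induction ks with
  | nil => intro cnt _; rfl
  | cons k t ih =>
    intro cnt h
    have hk : pvCg cnt k = 0 := h k (by simp)
    unfold pvPick
    rw [if_neg (by simpa [pvCg] using hk)]
    exact ih cnt (fun x hx => h x (by simp [hx]))

theorem pvPick_first : ∀ (ks cnt : List Int) (d : Int), ks.Pairwise (· > ·) → d ∈ ks →
    pvCg cnt d ≠ 0 → (∀ k ∈ ks, d < k → pvCg cnt k = 0) → pvPick cnt ks = some d := by
  intro ks
  induction ks with
  | nil => intro cnt d _ hd; exact absurd hd (by simp)
  | cons k t ih =>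
    intro cnt d hp hd hnz hz
    rcases List.mem_cons.mp hd with rfl | hd
    · unfold pvPick
      rw [if_pos (by simpa [pvCg] using hnz)]
    · have hgt : k > d := (List.pairwise_cons.mp hp).1 d hd
      have hk : pvCg cnt k = 0 := hz k (by simp) hgt
      unfold pvPick
      rw [if_neg (by simpa [pvCg] using hk)]
      exact ih cnt d (List.pairwise_cons.mp hp).2 hd hnz
        (fun x hx => hz x (by simp [hx]))

theorem pvCnt_build : ∀ (ds : List Char) (cnt : List Int), cnt.length = 10 →
    (∀ c ∈ ds, pvIsDig c) →
    (ds.foldl pvCntStep cnt).length = 10 ∧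
    (∀ k : Int, 0 ≤ k → k < 10 →
      pvCg (ds.foldl pvCntStep cnt) k = pvCg cnt k + (ds.count (pvDch k) : Int)) := by
  intro ds
  induction ds with
  | nil => intro cnt hlen _; exact ⟨hlen, by simp⟩
  | cons c t ih =>
    intro cnt hlen hdig
    have hc : pvIsDig c := hdig c (by simp)
    obtain ⟨hd1, hd2⟩ := pvDigit_bounds c hc
    have hstep : pvCntStep cnt c = PySem.List.pySetD cnt (pvDigit c) (pvCg cnt (pvDigit c) + 1) := rfl
    have hlen' : (pvCntStep cnt c).length = 10 := by
      rw [hstep, pvSetD_length _ _ _ hd1 (by omega)]; exact hlen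
    obtain ⟨ihl, ihc⟩ := ih (pvCntStep cnt c) hlen' (fun x hx => hdig x (by simp [hx]))
    refine ⟨by simpa using ihl, ?_⟩
    intro k hk1 hk2
    rw [List.foldl_cons, ihc k hk1 hk2, hstep, pvCg_set _ _ _ _ hd1 (by omega) hk1 (by omega)]
    rw [List.count_cons]
    by_cases h : k = pvDigit c
    · subst h
      rw [if_pos rfl, if_pos (beq_iff_eq.mpr (pvDch_pvDigit c hc).symm)]
      push_cast
      ring
    · have hne : ¬ ((c == pvDch k) = true) := by
        simp only [beq_iff_eq]
        intro he
        exact h (by rw [he, pvDigit_pvDch k hk1 hk2])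
      rw [if_neg h, if_neg hne]
      push_cast
      ring

theorem pvPart : ∀ (ds : List Char) (o e : List Char),
    ds.foldl pvPartStep (o, e) =
      (o ++ ds.filter (fun c => !(PySem.Int.mod (pvDigit c) 2 == 0)),
       e ++ ds.filter (fun c => PySem.Int.mod (pvDigit c) 2 == 0)) := by
  intro ds
  induction ds with
  | nil => intro o e; simp
  | cons c t ih =>
    intro o e
    rw [List.foldl_cons, List.filter_cons, List.filter_cons]
    cases h : (PySem.Int.mod (pvDigit c) 2 == 0) with
    | true =>
      have hs : pvPartStep (o, e) c = (o, e ++ [c]) := by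
        unfold pvPartStep; rw [h]; rfl
      rw [hs, ih]
      simp
    | false =>
      have hs : pvPartStep (o, e) c = (o ++ [c], e) := by
        unfold pvPartStep; rw [h]; rfl
      rw [hs, ih]
      simp

theorem pvMain : ∀ (rest odd even : List Char) (cnt : List Int) (s : List Char),
    (∀ c ∈ rest, pvIsDig c) →
    (∀ c ∈ odd, pvIsDig c ∧ ¬ PySem.Int.mod (pvDigit c) 2 = 0) →
    (∀ c ∈ even, pvIsDig c ∧ PySem.Int.mod (pvDigit c) 2 = 0) →
    odd.Pairwise (· ≤ ·) → even.Pairwise (· ≤ ·) →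
    cnt.length = 10 →
    (∀ k : Int, 0 ≤ k → k < 10 →
      pvCg cnt k = if PySem.Int.mod k 2 = 0 then (even.count (pvDch k) : Int)
                   else (odd.count (pvDch k) : Int)) →
    (rest.foldl pvStepA (s, odd, even)).1 = (rest.foldl pvStepB (cnt, s)).2 := by
  intro rest
  induction rest with
  | nil => intro odd even cnt s _ _ _ _ _ _ _; rfl
  | cons c t ih =>
    intro odd even cnt s hrest hodd heven hpo hpe hlen hcnt
    have hc : pvIsDig c := hrest c (by simp)
    have hrest' : ∀ x ∈ t, pvIsDig x := fun x hx => hrest x (by simp [hx])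
    rw [List.foldl_cons, List.foldl_cons]
    by_cases hpar : PySem.Int.mod (pvDigit c) 2 = 0
    · -- even position: A pops from even; B scans [8,6,4,2,0]
      have hA : pvStepA (s, odd, even) c =
          (match PySem.List.pop? even (-1) with
           | some (m, r) => (s ++ [m], odd, r)
           | none => (s, odd, even)) := by
        unfold pvStepA
        rw [if_pos (show (PySem.Int.mod (pvDigit c) 2 == 0) = true from by rw [hpar]; rfl)]
      have hksB : (if (PySem.Int.mod (pvDigit c) 2 != 0) = true then (9 : Int) else 8) = 8 := by
        rw [hpar]
        decide
      rcases even.eq_nil_or_concat with rfl | hconc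
      · have hz : ∀ k ∈ PySem.List.pyRange 8 (-1) (-2), pvCg cnt k = 0 := by
          intro k hk
          rw [show PySem.List.pyRange 8 (-1) (-2) = [8, 6, 4, 2, 0] from by decide] at hk
          fin_cases hk <;>
            rw [hcnt _ (by decide) (by decide), if_pos (by decide)] <;> simp
        have hB : pvStepB (cnt, s) c = (cnt, s) := by
          simp only [pvStepB, hksB]
          rw [pvPick_none _ _ hz]
        have hA' : pvStepA (s, odd, []) c = (s, odd, []) := by
          rw [hA, show PySem.List.pop? ([] : List Char) (-1) = none from by decide]
        rw [hA', hB]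
        exact ih odd [] cnt s hrest' hodd heven hpo hpe hlen hcnt
      · obtain ⟨es, m, he⟩ := hconc
        rw [List.concat_eq_append] at he
        subst he
        have hm := heven m (by simp)
        obtain ⟨hdm1, hdm2⟩ := pvDigit_bounds m hm.1
        have hcm : pvDch (pvDigit m) = m := pvDch_pvDigit m hm.1
        have hmtn : m.toNat = 48 + (pvDigit m).toNat := by
          rw [← hcm, pvDch_toNat _ hdm1 hdm2, hcm]
        have hA' : pvStepA (s, odd, es ++ [m]) c = (s ++ [m], odd, es) := by
          rw [hA, PySem.List.pop?_last]
        have hmem : pvDigit m ∈ PySem.List.pyRange 8 (-1) (-2) := by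
          rw [show PySem.List.pyRange 8 (-1) (-2) = [8, 6, 4, 2, 0] from by decide]
          have h2 := hm.2
          rcases pvDig_cases m hm.1 with rfl|rfl|rfl|rfl|rfl|rfl|rfl|rfl|rfl|rfl <;>
            revert h2 <;> decide
        have hnz : pvCg cnt (pvDigit m) ≠ 0 := by
          rw [hcnt _ hdm1 hdm2, if_pos hm.2, hcm]
          have : 0 < (es ++ [m]).count m := by simp [List.count_append]
          intro hcontra
          omega
        have hz : ∀ k ∈ PySem.List.pyRange 8 (-1) (-2), pvDigit m < k → pvCg cnt k = 0 := by
          intro k hk hlt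
          rw [show PySem.List.pyRange 8 (-1) (-2) = [8, 6, 4, 2, 0] from by decide] at hk
          have hkb : 0 ≤ k ∧ k < 10 ∧ PySem.Int.mod k 2 = 0 := by
            fin_cases hk <;> exact ⟨by decide, by decide, by decide⟩
          rw [hcnt k hkb.1 hkb.2.1, if_pos hkb.2.2]
          have hnotin : pvDch k ∉ es ++ [m] := by
            intro hin
            have hle : pvDch k ≤ m := by
              rcases List.mem_append.mp hin with h' | h'
              · exact (List.pairwise_append.mp hpe).2.2 _ h' m (by simp)
              · simp at h'
                rw [h']
            have hle' := (pvChar_le _ _).mp hle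
            rw [pvDch_toNat k hkb.1 hkb.2.1] at hle'
            omega
          rw [List.count_eq_zero.mpr hnotin]
          rfl
        have hpick : pvPick cnt (PySem.List.pyRange 8 (-1) (-2)) = some (pvDigit m) :=
          pvPick_first _ _ _ (by rw [show PySem.List.pyRange 8 (-1) (-2) = [8, 6, 4, 2, 0] from by decide]; decide)
            hmem hnz hz
        have hB : pvStepB (cnt, s) c =
            (PySem.List.pySetD cnt (pvDigit m) (pvCg cnt (pvDigit m) - 1), s ++ [m]) := by
          simp only [pvStepB, hksB, hpick, pvToChars_small _ hdm1 hdm2, hcm]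
          rfl
        rw [hA', hB]
        apply ih
        · exact hrest'
        · exact hodd
        · intro x hx
          exact heven x (by simp [hx])
        · exact hpo
        · exact (List.pairwise_append.mp hpe).1
        · rw [pvSetD_length _ _ _ hdm1 (by omega)]
          exact hlen
        · intro k hk1 hk2
          rw [pvCg_set _ _ _ _ hdm1 (by omega) hk1 (by omega)]
          by_cases hkm : k = pvDigit m
          · subst hkm
            rw [if_pos rfl, hcnt _ hk1 hk2, if_pos hm.2, if_pos hm.2, hcm]
            rw [List.count_append]
            simp
          · rw [if_neg hkm, hcnt _ hk1 hk2]
            by_cases hkp : PySem.Int.mod k 2 = 0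
            · rw [if_pos hkp, if_pos hkp]
              have hne : pvDch k ≠ m := by
                intro he
                exact hkm (by rw [← pvDigit_pvDch k hk1 hk2, he])
              rw [List.count_append, List.count_eq_zero.mpr (show pvDch k ∉ [m] by simp [hne])]
              simp
            · rw [if_neg hkp, if_neg hkp]
    · -- odd position: A pops from odd; B scans [9,7,5,3,1]
      have hA : pvStepA (s, odd, even) c =
          (match PySem.List.pop? odd (-1) with
           | some (m, r) => (s ++ [m], r, even)
           | none => (s, odd, even)) := by
        unfold pvStepA
        rw [if_neg (show ¬ ((PySem.Int.mod (pvDigit c) 2 == 0) = true) from by simp only [beq_iff_eq]; exact hpar)]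
      have hksB : (if (PySem.Int.mod (pvDigit c) 2 != 0) = true then (9 : Int) else 8) = 9 := by
        rw [if_pos (show (PySem.Int.mod (pvDigit c) 2 != 0) = true from by
          simp only [bne_iff_ne, ne_eq]; exact hpar)]
      rcases odd.eq_nil_or_concat with rfl | hconc
      · have hz : ∀ k ∈ PySem.List.pyRange 9 (-1) (-2), pvCg cnt k = 0 := by
          intro k hk
          rw [show PySem.List.pyRange 9 (-1) (-2) = [9, 7, 5, 3, 1] from by decide] at hk
          fin_cases hk <;>
            rw [hcnt _ (by decide) (by decide), if_neg (by decide)] <;> simp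
        have hB : pvStepB (cnt, s) c = (cnt, s) := by
          simp only [pvStepB, hksB]
          rw [pvPick_none _ _ hz]
        have hA' : pvStepA (s, [], even) c = (s, [], even) := by
          rw [hA, show PySem.List.pop? ([] : List Char) (-1) = none from by decide]
        rw [hA', hB]
        exact ih [] even cnt s hrest' hodd heven hpo hpe hlen hcnt
      · obtain ⟨es, m, he⟩ := hconc
        rw [List.concat_eq_append] at he
        subst he
        have hm := hodd m (by simp)
        obtain ⟨hdm1, hdm2⟩ := pvDigit_bounds m hm.1
        have hcm : pvDch (pvDigit m) = m := pvDch_pvDigit m hm.1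
        have hmtn : m.toNat = 48 + (pvDigit m).toNat := by
          rw [← hcm, pvDch_toNat _ hdm1 hdm2, hcm]
        have hA' : pvStepA (s, es ++ [m], even) c = (s ++ [m], es, even) := by
          rw [hA, PySem.List.pop?_last]
        have hmem : pvDigit m ∈ PySem.List.pyRange 9 (-1) (-2) := by
          rw [show PySem.List.pyRange 9 (-1) (-2) = [9, 7, 5, 3, 1] from by decide]
          have h2 := hm.2
          rcases pvDig_cases m hm.1 with rfl|rfl|rfl|rfl|rfl|rfl|rfl|rfl|rfl|rfl <;>
            revert h2 <;> decide
        have hnz : pvCg cnt (pvDigit m) ≠ 0 := by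
          rw [hcnt _ hdm1 hdm2, if_neg hm.2, hcm]
          have : 0 < (es ++ [m]).count m := by simp [List.count_append]
          intro hcontra
          omega
        have hz : ∀ k ∈ PySem.List.pyRange 9 (-1) (-2), pvDigit m < k → pvCg cnt k = 0 := by
          intro k hk hlt
          rw [show PySem.List.pyRange 9 (-1) (-2) = [9, 7, 5, 3, 1] from by decide] at hk
          have hkb : 0 ≤ k ∧ k < 10 ∧ ¬ PySem.Int.mod k 2 = 0 := by
            fin_cases hk <;> exact ⟨by decide, by decide, by decide⟩
          rw [hcnt k hkb.1 hkb.2.1, if_neg hkb.2.2]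
          have hnotin : pvDch k ∉ es ++ [m] := by
            intro hin
            have hle : pvDch k ≤ m := by
              rcases List.mem_append.mp hin with h' | h'
              · exact (List.pairwise_append.mp hpo).2.2 _ h' m (by simp)
              · simp at h'
                rw [h']
            have hle' := (pvChar_le _ _).mp hle
            rw [pvDch_toNat k hkb.1 hkb.2.1] at hle'
            omega
          rw [List.count_eq_zero.mpr hnotin]
          rfl
        have hpick : pvPick cnt (PySem.List.pyRange 9 (-1) (-2)) = some (pvDigit m) :=
          pvPick_first _ _ _ (by rw [show PySem.List.pyRange 9 (-1) (-2) = [9, 7, 5, 3, 1] from by decide]; decide)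
            hmem hnz hz
        have hB : pvStepB (cnt, s) c =
            (PySem.List.pySetD cnt (pvDigit m) (pvCg cnt (pvDigit m) - 1), s ++ [m]) := by
          simp only [pvStepB, hksB, hpick, pvToChars_small _ hdm1 hdm2, hcm]
          rfl
        rw [hA', hB]
        apply ih
        · exact hrest'
        · intro x hx
          exact hodd x (by simp [hx])
        · exact heven
        · exact (List.pairwise_append.mp hpo).1
        · exact hpe
        · rw [pvSetD_length _ _ _ hdm1 (by omega)]
          exact hlen
        · intro k hk1 hk2
          rw [pvCg_set _ _ _ _ hdm1 (by omega) hk1 (by omega)]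
          by_cases hkm : k = pvDigit m
          · subst hkm
            rw [if_pos rfl, hcnt _ hk1 hk2, if_neg hm.2, if_neg hm.2, hcm]
            rw [List.count_append]
            simp
          · rw [if_neg hkm, hcnt _ hk1 hk2]
            by_cases hkp : PySem.Int.mod k 2 = 0
            · rw [if_pos hkp, if_pos hkp]
            · rw [if_neg hkp, if_neg hkp]
              have hne : pvDch k ≠ m := by
                intro he
                exact hkm (by rw [← pvDigit_pvDch k hk1 hk2, he])
              rw [List.count_append, List.count_eq_zero.mpr (show pvDch k ∉ [m] by simp [hne])]
              simp

-- ===== VERDICT (by name: the statement is the Claim_ definition above) =====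
theorem pvUnfold : ∀ (num : Int),
    largestInteger num = (PySem.Int.ofChars? ((PySem.Int.toChars num).foldl pvStepA
      ([], PySem.List.sorted ((PySem.Int.toChars num).foldl pvPartStep ([], [])).1 (fun x => x),
           PySem.List.sorted ((PySem.Int.toChars num).foldl pvPartStep ([], [])).2 (fun x => x))).1).getD 0 ∧
    largestInteger_alt num = (PySem.Int.ofChars? ((PySem.Int.toChars num).foldl pvStepB
      ((PySem.Int.toChars num).foldl pvCntStep (List.replicate 10 0), [])).2).getD 0 := by
  intro num
  exact ⟨rfl, rfl⟩

theorem largestInteger_spec : Claim_equal_largestInteger := by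
  intro num _ hpre
  unfold Spec_largestInteger
  obtain ⟨hu1, hu2⟩ := pvUnfold num
  rw [hu1, hu2]
  have hdig := pvToChars_dig num hpre
  rw [pvPart _ [] []]
  simp only [List.nil_append]
  obtain ⟨hlen, hcnt⟩ := pvCnt_build (PySem.Int.toChars num) (List.replicate 10 0) (by simp) hdig
  rw [pvMain (PySem.Int.toChars num)
      (PySem.List.sorted ((PySem.Int.toChars num).filter (fun c => !(PySem.Int.mod (pvDigit c) 2 == 0))) (fun x => x))
      (PySem.List.sorted ((PySem.Int.toChars num).filter (fun c => PySem.Int.mod (pvDigit c) 2 == 0)) (fun x => x))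
      ((PySem.Int.toChars num).foldl pvCntStep (List.replicate 10 0)) [] hdig ?_ ?_ ?_ ?_ hlen ?_]
  · intro x hx
    rw [PySem.List.mem_sorted] at hx
    obtain ⟨hx1, hx2⟩ := List.mem_filter.mp hx
    refine ⟨hdig x hx1, ?_⟩
    simpa using hx2
  · intro x hx
    rw [PySem.List.mem_sorted] at hx
    obtain ⟨hx1, hx2⟩ := List.mem_filter.mp hx
    refine ⟨hdig x hx1, ?_⟩
    simpa using hx2
  · simpa using PySem.List.sorted_pairwise ((PySem.Int.toChars num).filter (fun c => !(PySem.Int.mod (pvDigit c) 2 == 0))) (fun x => x)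
  · simpa using PySem.List.sorted_pairwise ((PySem.Int.toChars num).filter (fun c => PySem.Int.mod (pvDigit c) 2 == 0)) (fun x => x)
  · intro k hk1 hk2
    rw [hcnt k hk1 hk2, pvCg_replicate k hk1 hk2]
    have hdk : pvDigit (pvDch k) = k := pvDigit_pvDch k hk1 hk2
    by_cases hkp : PySem.Int.mod k 2 = 0
    · rw [if_pos hkp]
      rw [((PySem.List.sorted_perm _ _ _).count_eq _)]
      rw [List.count_filter (p := fun c => PySem.Int.mod (pvDigit c) 2 == 0) (a := pvDch k) (show (PySem.Int.mod (pvDigit (pvDch k)) 2 == 0) = true from by rw [hdk, hkp]; rfl)]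
      ring
    · rw [if_neg hkp]
      rw [((PySem.List.sorted_perm _ _ _).count_eq _)]
      rw [List.count_filter (p := fun c => !(PySem.Int.mod (pvDigit c) 2 == 0)) (a := pvDch k) (show (!(PySem.Int.mod (pvDigit (pvDch k)) 2 == 0)) = true from by
        rw [hdk]
        simp only [Bool.not_eq_true', beq_eq_false_iff_ne, ne_eq]
        exact hkp)]
      ring
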